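-- pv_equiv track=rewrite | github.com/AI-replica/filenames_sanitizer | utils/name_shortening.py | remove_non_digits
-- ===== SOURCE A (Python) =====
-- def remove_non_digits(name, max_length):
--     """
--     >>> remove_non_digits("2024-07-06 20.56.55", 30) # do nothing
--     '2024-07-06 20.56.55'
--     >>> remove_non_digits("2024-07-06 20.56.55", 17)
--     '20240706 20.56.55'
--     >>> remove_non_digits("2024-07-06 20.56.55", 10)
--     '20240706205655'
--     """
--
--     if len(name) <= max_length:
--         return name
--
--     how_many_chars_to_remove = len(name) - max_length
--
--     # it shouldn't be more than the number of non-digits in name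
--     how_many_non_digits = sum(1 for ch in name if not ch.isdigit())
--     how_many_chars_to_remove = min(how_many_chars_to_remove, how_many_non_digits)
--
--     # iteratively remove non-digits, starting from the start of name
--     clean_name = ""
--     for ch in name:
--         if ch.isdigit() or how_many_chars_to_remove == 0:
--             clean_name += ch
--         else:
--             how_many_chars_to_remove -= 1
--
--     return clean_name
-- ===== SOURCE B (Python) =====
-- def remove_non_digits(name, max_length):
--     if len(name) <= max_length:
--         return name
--     # positions of all non-digit characters, in order
--     nd = [i for i, ch in enumerate(name) if not ch.isdigit()]
--     k = min(len(name) - max_length, len(nd))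
--     # p = end of the prefix containing exactly the first k non-digits
--     p = 0 if k == 0 else nd[k - 1] + 1
--     return ''.join(ch for ch in name[:p] if ch.isdigit()) + name[p:]
-- ===== Notes on version B (the rewrite author's own statement) =====
-- stated objective: alternative
-- what changed: Instead of one pass with a decrementing removal counter, B precomputes the index list of non-digit characters, locates the position p just past the k-th one, and returns the digit-filtered prefix name[:p] concatenated with the untouched suffix name[p:].
import Mathlib
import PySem

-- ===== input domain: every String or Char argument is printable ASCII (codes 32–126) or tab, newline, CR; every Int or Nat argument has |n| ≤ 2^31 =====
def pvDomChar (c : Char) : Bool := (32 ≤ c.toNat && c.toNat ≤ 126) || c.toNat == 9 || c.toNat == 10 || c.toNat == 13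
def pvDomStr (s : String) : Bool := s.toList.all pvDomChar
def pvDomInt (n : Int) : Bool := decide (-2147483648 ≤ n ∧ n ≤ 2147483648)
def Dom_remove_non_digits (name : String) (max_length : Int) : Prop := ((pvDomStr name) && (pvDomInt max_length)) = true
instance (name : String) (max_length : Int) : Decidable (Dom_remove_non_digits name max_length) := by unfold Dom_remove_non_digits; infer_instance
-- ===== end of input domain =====

-- B replaces A's decrementing-counter pass by: index list of non-digits, the cut point p past the k-th one, then digit-filtered prefix ++ untouched suffix (alternative decomposition, same cost).

-- ===== PORT A =====
def remove_non_digits (name : String) (max_length : Int) : String :=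
  let cs := name.toList
  if PySem.Chars.len cs ≤ max_length then name
  else
    let r0 : Int := PySem.Chars.len cs - max_length
    -- sum(1 for ch in name if not ch.isdigit())
    let nonDigits : Int := cs.foldl (fun a c => if !PySem.Chars.isdigit c then a + 1 else a) 0
    let r : Int := min r0 nonDigits
    -- for ch in name: if ch.isdigit() or r == 0: clean += ch else r -= 1
    let st := cs.foldl (fun (st : List Char × Int) c =>
        if PySem.Chars.isdigit c || st.2 == 0 then (st.1 ++ [c], st.2) else (st.1, st.2 - 1))
      ([], r)
    String.mk st.1

-- ===== PORT B =====
def remove_non_digits_alt (name : String) (max_length : Int) : String :=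
  let cs := name.toList
  if PySem.Chars.len cs ≤ max_length then name
  else
    let nd : List Int :=
      ((PySem.List.enumerate cs 0).filter (fun p => !PySem.Chars.isdigit p.2)).map (·.1)
    let k : Int := min (PySem.Chars.len cs - max_length) (PySem.List.len nd)
    let p : Int := if k == 0 then 0 else PySem.List.pyGetD nd (k - 1) 0 + 1
    String.mk ((PySem.List.slice cs none (some p)).filter (fun c => PySem.Chars.isdigit c)
               ++ PySem.List.slice cs (some p) none)

-- ===== PRECONDITION & SPEC =====
def Spec_remove_non_digits (name : String) (max_length : Int) (out : String) : Prop := out = remove_non_digits_alt name max_length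
instance (name : String) (max_length : Int) (out : String) : Decidable (Spec_remove_non_digits name max_length out) := by unfold Spec_remove_non_digits; infer_instance

-- ===== CLAIM (what is proved, stated in full; the proofs are below) =====
def Claim_equal_remove_non_digits : Prop := ∀ (name : String) (max_length : Int), Dom_remove_non_digits name max_length → Spec_remove_non_digits name max_length (remove_non_digits name max_length)

-- ===== LEMMAS AND PROOFS =====

-- what A's removal loop computes, as a structural recursion on the chars
def dropND : List Char → Nat → List Char
  | cs, 0 => cs
  | [], _ + 1 => []
  | c :: cs, k + 1 => if PySem.Chars.isdigit c then c :: dropND cs (k + 1) else dropND cs k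

-- length of the shortest prefix containing k non-digits
def posND : List Char → Nat → Nat
  | _, 0 => 0
  | [], _ + 1 => 0
  | c :: cs, k + 1 => 1 + if PySem.Chars.isdigit c then posND cs (k + 1) else posND cs k

-- the index list built by B, parametrised by the enumerate start
def ndIdx (cs : List Char) (s : Int) : List Int :=
  ((PySem.List.enumerate cs s).filter (fun p => !PySem.Chars.isdigit p.2)).map (·.1)

lemma ndIdx_cons (c : Char) (cs : List Char) (s : Int) :
    ndIdx (c :: cs) s =
      if PySem.Chars.isdigit c then ndIdx cs (s + 1) else s :: ndIdx cs (s + 1) := by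
  by_cases h : PySem.Chars.isdigit c <;>
    simp [ndIdx, PySem.List.enumerate_cons, h]

lemma ndIdx_length (cs : List Char) (s : Int) :
    (ndIdx cs s).length = cs.countP (fun c => !PySem.Chars.isdigit c) := by
  induction cs generalizing s with
  | nil => rfl
  | cons c cs ih =>
    rw [ndIdx_cons]
    by_cases h : PySem.Chars.isdigit c <;> simp [h, ih]

-- A's loop from counter r appends dropND cs r
lemma loopA_eq (cs : List Char) (acc : List Char) (k : Nat) :
    cs.foldl (fun (st : List Char × Int) c =>
        if PySem.Chars.isdigit c || st.2 == 0 then (st.1 ++ [c], st.2) else (st.1, st.2 - 1))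
      (acc, (k : Int)) =
    (acc ++ dropND cs k, ((k - cs.countP (fun c => !PySem.Chars.isdigit c) : Nat) : Int)) := by
  induction cs generalizing acc k with
  | nil => cases k <;> simp [dropND]
  | cons c cs ih =>
    simp only [List.foldl_cons]
    by_cases h : PySem.Chars.isdigit c
    · have hstep : (if (PySem.Chars.isdigit c || ((k : Int) == 0)) = true
          then (acc ++ [c], (k : Int)) else (acc, (k : Int) - 1)) = (acc ++ [c], (k : Int)) := by
        simp [h]
      rw [hstep, ih]
      cases k <;> simp [dropND, h]
    · cases k with
      | zero =>
        have h0 := ih (acc ++ [c]) 0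
        simp only [Nat.cast_zero] at h0 ⊢
        rw [if_pos (by simp), h0]
        simp [dropND]
      | succ k =>
        have hstep : (if (PySem.Chars.isdigit c || (((k + 1 : Nat) : Int)) == 0) = true
            then (acc ++ [c], ((k + 1 : Nat) : Int)) else (acc, ((k + 1 : Nat) : Int) - 1))
            = (acc, ((k : Nat) : Int)) := by
          rw [if_neg]
          · congr 1
            push_cast
            ring
          · simp only [h, Bool.false_or, beq_iff_eq]
            push_cast
            omega
        rw [hstep, ih]
        simp [dropND, h]

-- dropND as filtered prefix ++ suffix at the cut point
lemma dropND_eq (cs : List Char) (k : Nat)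
    (hk : k ≤ cs.countP (fun c => !PySem.Chars.isdigit c)) :
    dropND cs k = (cs.take (posND cs k)).filter (fun c => PySem.Chars.isdigit c)
                  ++ cs.drop (posND cs k) := by
  induction cs generalizing k with
  | nil => cases k <;> simp [dropND, posND]
  | cons c cs ih =>
    cases k with
    | zero => simp [dropND, posND]
    | succ k =>
      by_cases h : PySem.Chars.isdigit c
      · have hk' : k + 1 ≤ cs.countP (fun c => !PySem.Chars.isdigit c) := by
          simpa [List.countP_cons, h] using hk
        simp [dropND, posND, h, ih _ hk', Nat.add_comm 1]
      · have hk' : k ≤ cs.countP (fun c => !PySem.Chars.isdigit c) := by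
          simp [h] at hk
          omega
        simp [dropND, posND, h, ih _ hk', Nat.add_comm 1]

-- B's nd[k] points one before the cut for k+1 removals
lemma ndIdx_getD (cs : List Char) (s : Int) (k : Nat)
    (hk : k + 1 ≤ cs.countP (fun c => !PySem.Chars.isdigit c)) :
    (ndIdx cs s).getD k 0 = s + posND cs (k + 1) - 1 := by
  induction cs generalizing s k with
  | nil => simp at hk
  | cons c cs ih =>
    by_cases h : PySem.Chars.isdigit c
    · have hk' : k + 1 ≤ cs.countP (fun c => !PySem.Chars.isdigit c) := by
        simpa [List.countP_cons, h] using hk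
      rw [ndIdx_cons]
      simp only [h, if_true, ih (s + 1) k hk']
      simp [posND, h]
      ring
    · rw [ndIdx_cons]
      simp only [h, Bool.false_eq_true, if_false]
      cases k with
      | zero =>
        simp [posND, h]
      | succ k =>
        have hk' : k + 1 ≤ cs.countP (fun c => !PySem.Chars.isdigit c) := by
          simp [h] at hk
          omega
        rw [List.getD_cons_succ, ih (s + 1) k hk']
        simp [posND, h]
        ring

-- ===== VERDICT (by name: the statement is the Claim_ definition above) =====
theorem remove_non_digits_spec : Claim_equal_remove_non_digits := by
  intro name max_length _
  unfold Spec_remove_non_digits remove_non_digits remove_non_digits_alt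
  simp only [PySem.Chars.len_eq]
  by_cases hle : ((name.toList.length : Int) ≤ max_length)
  · rw [if_pos hle, if_pos hle]
  · rw [if_neg hle, if_neg hle]
    rw [PySem.List.foldl_if_add_one]
    have hCle : name.toList.countP (fun c => !PySem.Chars.isdigit c) ≤ name.toList.length :=
      List.countP_le_length
    have hnd : ((PySem.List.enumerate name.toList 0).filter
        (fun p => !PySem.Chars.isdigit p.2)).map (·.1) = ndIdx name.toList 0 := rfl
    rw [hnd, PySem.List.len_eq, ndIdx_length]
    set C := name.toList.countP (fun c => !PySem.Chars.isdigit c) with hCdef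
    set kn : Nat := min ((name.toList.length : Int) - max_length).toNat C with hkn
    have hmin : min ((name.toList.length : Int) - max_length) (C : Int) = (kn : Int) := by
      rw [hkn]
      omega
    rw [zero_add, hmin, loopA_eq]
    have hknC : kn ≤ C := by omega
    cases hk0 : kn with
    | zero =>
      rw [if_pos (by decide)]
      rw [PySem.List.slice_to (hb := by norm_num), PySem.List.slice_from (ha := by norm_num)]
      simp [dropND]
    | succ j =>
      rw [if_neg (by simp; omega)]
      rw [show (((j + 1 : Nat) : Int) - 1) = ((j : Nat) : Int) by omega]
      rw [PySem.List.pyGetD_natCast, ndIdx_getD name.toList 0 j (by omega)]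
      rw [show ((0 : Int) + ((posND name.toList (j + 1) : Nat) : Int) - 1 + 1)
            = ((posND name.toList (j + 1) : Nat) : Int) by omega]
      rw [PySem.List.slice_to_natCast, PySem.List.slice_from_natCast]
      rw [dropND_eq name.toList (j + 1) (by omega)]
      simp
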